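-- pv_equiv track=rewrite | github.com/micchyboy237/JetScripts | converted_doc_scripts/convert_notebooks_to_scripts.py | merge_consecutive_same_type
-- ===== SOURCE A (Python) =====
-- def merge_consecutive_same_type(source_groups, separator="\n\n"):
--     if not source_groups:
--         return []
--     source_groups = source_groups.copy()
--     merged_groups = [source_groups[0]]
--     for current in source_groups[1:]:
--         last = merged_groups[-1]
--         if last["type"] == current["type"]:
--             last["code"] += separator + current["code"]
--         else:
--             merged_groups.append(current)
--     return merged_groups
-- ===== SOURCE B (Python) =====
-- def merge_consecutive_same_type(source_groups, separator="\n\n"):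
--     # Run-splitting rewrite: scan for each maximal run of equal 'type' and join
--     # its codes once, instead of A's per-element accumulator that extends the run head's
--     # code string merge by merge.
--     if not source_groups:
--         return []
--     result = []
--     n = len(source_groups)
--     s = 0
--     while s < n:
--         head = source_groups[s]
--         e = s + 1
--         while e < n and source_groups[e]["type"] == head["type"]:
--             e += 1
--         if e - s > 1:
--             head["code"] = separator.join(g["code"] for g in source_groups[s:e])
--         result.append(head)
--         s = e
--     return result
-- ===== Notes on version B (the rewrite author's own statement) =====
-- stated objective: alternative
-- what changed: Replaces A's accumulator loop that grows merged_groups[-1]['code'] with repeated 'last["code"] += separator + cur["code"]' by a run-splitting index scan: find the end of each maximal run of equal 'type', join that run's codes with one separator.join, and advance to the next run.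
import Mathlib
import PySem

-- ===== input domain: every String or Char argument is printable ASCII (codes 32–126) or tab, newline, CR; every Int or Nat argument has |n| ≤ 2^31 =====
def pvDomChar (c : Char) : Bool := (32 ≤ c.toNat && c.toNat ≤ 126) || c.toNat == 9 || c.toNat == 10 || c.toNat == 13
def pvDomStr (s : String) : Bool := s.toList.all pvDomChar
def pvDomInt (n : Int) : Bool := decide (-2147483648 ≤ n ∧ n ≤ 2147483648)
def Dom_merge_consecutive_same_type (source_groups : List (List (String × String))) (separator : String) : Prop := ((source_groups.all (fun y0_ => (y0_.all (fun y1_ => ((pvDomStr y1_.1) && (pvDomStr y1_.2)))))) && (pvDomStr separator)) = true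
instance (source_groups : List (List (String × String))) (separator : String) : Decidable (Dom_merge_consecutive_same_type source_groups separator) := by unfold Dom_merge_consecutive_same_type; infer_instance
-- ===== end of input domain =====

-- B rewrites A's accumulator loop (repeated `last["code"] += …`) as a run-splitting scan that
-- joins each maximal same-type run's codes once; both Pythons mutate the run-head dicts in
-- place identically (the equivalence proved here is about the return value).

-- dict helpers shared by both ports: g[k] read (Python raises KeyError when k is absent —
-- those inputs are excluded by Pre_, the port reads "" there) and g[k] = v write.
def dGet (g : List (String × String)) (k : String) : String :=
  (PySem.Dict.mk g).getD k ""
def dSet (g : List (String × String)) (k v : String) : List (String × String) :=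
  ((PySem.Dict.mk g).insert k v).items

-- ===== PORT A =====
-- merged_groups is kept reversed (head = merged_groups[-1]); reversed on return.
def mergeA_go (sep : String) (merged : List (List (String × String))) (rest : List (List (String × String))) : List (List (String × String)) :=
  match rest, merged with
  | [], _ => merged
  | cur :: rest', last :: prev =>
      if dGet last "type" == dGet cur "type" then
        mergeA_go sep (dSet last "code" (dGet last "code" ++ (sep ++ dGet cur "code")) :: prev) rest'
      else
        mergeA_go sep (cur :: last :: prev) rest'
  | _ :: _, [] => []   -- unreachable: merged_groups starts nonempty and never shrinks

def merge_consecutive_same_type (source_groups : List (List (String × String))) (separator : String) : List (List (String × String)) :=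
  match source_groups with
  | [] => []
  | g0 :: rest => (mergeA_go separator [g0] rest).reverse

-- ===== PORT B =====
-- inner while loop: `while e < n and source_groups[e]["type"] == head["type"]: e += 1`
def bRun (sg : List (List (String × String))) (head : List (String × String)) (e : Nat) : Nat :=
  if e < sg.length ∧ dGet (sg.getD e []) "type" == dGet head "type" then
    bRun sg head (e + 1)
  else e
termination_by sg.length - e

theorem bRun_le (sg : List (List (String × String))) (head : List (String × String)) (e : Nat) :
    e ≤ bRun sg head e := by
  fun_induction bRun sg head e with
  | case1 e h ih => omega
  | case2 e h => omega

-- outer while loop over the run start index s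
def bOuter (sg : List (List (String × String))) (sep : String) (s : Nat) : List (List (String × String)) :=
  if h : s < sg.length then
    let head := sg.getD s []
    let e := bRun sg head (s + 1)
    let head' :=
      if 1 < e - s then
        -- source_groups[s:e]
        dSet head "code" (PySem.Str.join sep ((PySem.List.slice sg (some (s : Int)) (some (e : Int))).map (fun g => dGet g "code")))
      else head
    head' :: bOuter sg sep e
  else []
termination_by sg.length - s
decreasing_by
  have := bRun_le sg (sg.getD s []) (s + 1)
  omega

def merge_consecutive_same_type_alt (source_groups : List (List (String × String))) (separator : String) : List (List (String × String)) :=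
  if source_groups.isEmpty then [] else bOuter source_groups separator 0

-- ===== PRECONDITION & SPEC =====
-- Pre_ is exactly the inputs on which the Python A returns normally (and B does too): every
-- group carries "type" when the list has ≥ 2 groups, and any two adjacent groups of equal
-- type both carry "code"; elsewhere both Pythons raise KeyError.
def Pre_merge_consecutive_same_type (source_groups : List (List (String × String))) (separator : String) : Prop :=
  (2 ≤ source_groups.length → ∀ g ∈ source_groups, ((PySem.Dict.mk g).get? "type").isSome = true) ∧
  (∀ p ∈ source_groups.zip source_groups.tail,
    dGet p.1 "type" = dGet p.2 "type" →
      ((PySem.Dict.mk p.1).get? "code").isSome = true ∧ ((PySem.Dict.mk p.2).get? "code").isSome = true)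

instance (source_groups : List (List (String × String))) (separator : String) : Decidable (Pre_merge_consecutive_same_type source_groups separator) := by
  unfold Pre_merge_consecutive_same_type; infer_instance

def pvWitness_merge_consecutive_same_type : (List (List (String × String))) × String :=
  ([[("type", "a"), ("code", "x")], [("type", "a"), ("code", "y")], [("type", "b"), ("code", "z")]], "\n\n")

def Spec_merge_consecutive_same_type (source_groups : List (List (String × String))) (separator : String) (out : List (List (String × String))) : Prop :=
  out = merge_consecutive_same_type_alt source_groups separator

instance (source_groups : List (List (String × String))) (separator : String) (out : List (List (String × String))) : Decidable (Spec_merge_consecutive_same_type source_groups separator out) := by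
  unfold Spec_merge_consecutive_same_type; infer_instance

-- ===== CLAIM =====
def Claim_equal_merge_consecutive_same_type : Prop :=
  ∀ (source_groups : List (List (String × String))) (separator : String),
    Dom_merge_consecutive_same_type source_groups separator →
    Pre_merge_consecutive_same_type source_groups separator →
    Spec_merge_consecutive_same_type source_groups separator (merge_consecutive_same_type source_groups separator)

-- ===== LEMMAS AND PROOFS =====

-- length of the leading run of `l` whose "type" equals t
def rl (t : String) : List (List (String × String)) → Nat
  | [] => 0
  | g :: tl => if dGet g "type" == t then rl t tl + 1 else 0

theorem bRun_eq (sg : List (List (String × String))) (head : List (String × String)) (e : Nat) :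
    bRun sg head e = e + rl (dGet head "type") (sg.drop e) := by
  fun_induction bRun sg head e with
  | case1 e h ih =>
      obtain ⟨hlt, hty⟩ := h
      rw [ih, List.drop_eq_getElem_cons hlt, rl]
      rw [List.getD_eq_getElem?_getD, List.getElem?_eq_getElem hlt] at hty
      simp only [Option.getD_some] at hty
      rw [if_pos hty]
      omega
  | case2 e h =>
      rcases Nat.lt_or_ge e sg.length with hlt | hge
      · rw [List.drop_eq_getElem_cons hlt, rl, if_neg]
        · omega
        · intro hty
          exact h ⟨hlt, by rwa [List.getD_eq_getElem?_getD, List.getElem?_eq_getElem hlt]⟩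
      · rw [List.drop_eq_nil_of_le hge, rl]
        omega

-- the clean run-splitting function on lists (proof scaffold for both ports)
def bl (sep : String) : List (List (String × String)) → List (List (String × String))
  | [] => []
  | head :: tl =>
    (if 0 < rl (dGet head "type") tl then
        dSet head "code"
          (PySem.Str.join sep ((head :: tl.take (rl (dGet head "type") tl)).map (fun g => dGet g "code")))
      else head) :: bl sep (tl.drop (rl (dGet head "type") tl))
termination_by l => l.length
decreasing_by
  simp only [List.length_cons, List.length_drop]
  omega

theorem bOuter_eq (sg : List (List (String × String))) (sep : String) :
    ∀ (m s : Nat), sg.length - s ≤ m → bOuter sg sep s = bl sep (sg.drop s) := by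
  intro m
  induction m with
  | zero =>
      intro s hs
      rw [bOuter, dif_neg (by omega), List.drop_eq_nil_of_le (by omega), bl]
  | succ m ih =>
      intro s hs
      by_cases h : s < sg.length
      · rw [bOuter, dif_pos h]
        simp only []
        have hhead : sg.getD s ([] : List (String × String)) = sg[s] := by
          simp [List.getD_eq_getElem?_getD, List.getElem?_eq_getElem h]
        rw [hhead, bRun_eq]
        set k := rl (dGet sg[s] "type") (sg.drop (s + 1)) with hk
        have hcond : (1 < s + 1 + k - s) ↔ (0 < k) := by omega
        have htake : PySem.List.slice sg (some (s : Int)) (some ((s + 1 + k : Nat) : Int)) =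
            sg[s] :: (sg.drop (s + 1)).take k := by
          rw [PySem.List.slice_natCast, show s + 1 + k - s = k + 1 by omega,
            List.drop_eq_getElem_cons h, List.take_succ_cons]
        have hih : bOuter sg sep (s + 1 + k) = bl sep (sg.drop (s + 1 + k)) :=
          ih (s + 1 + k) (by omega)
        rw [htake, hih, List.drop_eq_getElem_cons h, bl]
        simp only [← hk]
        congr 1
        · rw [if_congr hcond rfl rfl]
        · rw [List.drop_drop]
      · rw [bOuter, dif_neg h, List.drop_eq_nil_of_le (by omega), bl]

theorem toList_injective (s t : String) (h : s.toList = t.toList) : s = t :=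
  String.toList_inj.mp h

theorem join_single (sep a : String) : PySem.Str.join sep [a] = a := by
  apply toList_injective
  simp only [PySem.Str.toList_join, List.map_cons, List.map_nil, PySem.Chars.join_singleton]

theorem join_absorb (sep x y : String) (L : List String) :
    PySem.Str.join sep (x :: y :: L) = PySem.Str.join sep ((x ++ (sep ++ y)) :: L) := by
  cases L with
  | nil =>
      apply toList_injective
      simp [PySem.Str.toList_join, PySem.Chars.join_cons_cons, PySem.Chars.join_singleton,
        String.toList_append]
  | cons l0 L' =>
      apply toList_injective
      simp [PySem.Str.toList_join, PySem.Chars.join_cons_cons, String.toList_append]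

-- type is untouched by a "code" write
theorem dGet_dSet_type (g : List (String × String)) (v : String) :
    dGet (dSet g "code" v) "type" = dGet g "type" := by
  simp only [dGet, dSet]
  rw [show PySem.Dict.mk ((PySem.Dict.mk g).insert "code" v).items = (PySem.Dict.mk g).insert "code" v from rfl]
  exact PySem.Dict.getD_insert_of_ne _ _ _ (by decide)

theorem dGet_dSet_code (g : List (String × String)) (v : String) :
    dGet (dSet g "code" v) "code" = v := by
  simp only [dGet, dSet]
  rw [show PySem.Dict.mk ((PySem.Dict.mk g).insert "code" v).items = (PySem.Dict.mk g).insert "code" v from rfl]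
  exact PySem.Dict.getD_insert_self _ _ _ _

theorem dSet_dSet (g : List (String × String)) (v w : String) :
    dSet (dSet g "code" v) "code" w = dSet g "code" w := by
  simp only [dSet]
  rw [show PySem.Dict.mk ((PySem.Dict.mk g).insert "code" v).items = (PySem.Dict.mk g).insert "code" v from rfl]
  rw [PySem.Dict.insert_insert_self]

-- merging one element into the run head commutes with bl
theorem bl_absorb (sep : String) (last cur : List (String × String)) (rest : List (List (String × String)))
    (hty : dGet last "type" == dGet cur "type") :
    bl sep (last :: cur :: rest) =
      bl sep (dSet last "code" (dGet last "code" ++ (sep ++ dGet cur "code")) :: rest) := by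
  have hty2 : (dGet cur "type" == dGet last "type") = true := by
    rw [beq_iff_eq] at hty ⊢; exact hty.symm
  have hty' : dGet (dSet last "code" (dGet last "code" ++ (sep ++ dGet cur "code"))) "type"
      = dGet last "type" := dGet_dSet_type _ _
  have hrl : rl (dGet last "type") (cur :: rest) = rl (dGet last "type") rest + 1 := by
    simp [rl, hty2]
  rw [bl, bl, hty', hrl]
  set k := rl (dGet last "type") rest with hk
  rw [List.take_succ_cons, List.drop_succ_cons, if_pos (Nat.succ_pos k)]
  congr 1
  by_cases hk0 : 0 < k
  · rw [if_pos hk0, List.map_cons, List.map_cons, List.map_cons, join_absorb, dSet_dSet,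
      dGet_dSet_code]
  · rw [if_neg hk0]
    have hk0' : k = 0 := by omega
    rw [hk0', List.take_zero, List.map_cons, List.map_cons, List.map_nil, join_absorb,
      join_single]

theorem bl_push (sep : String) (last cur : List (String × String)) (rest : List (List (String × String)))
    (hty : ¬ (dGet last "type" == dGet cur "type") = true) :
    bl sep (last :: cur :: rest) = last :: bl sep (cur :: rest) := by
  rw [bl]
  have hrl : rl (dGet last "type") (cur :: rest) = 0 := by
    rw [rl, if_neg]
    intro h
    exact hty (by rwa [beq_iff_eq, eq_comm, ← beq_iff_eq] at h)
  simp [hrl]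

theorem mergeA_go_eq (sep : String) (rest : List (List (String × String))) :
    ∀ (last : List (String × String)) (prev : List (List (String × String))),
      (mergeA_go sep (last :: prev) rest).reverse = prev.reverse ++ bl sep (last :: rest) := by
  induction rest with
  | nil =>
      intro last prev
      rw [mergeA_go, bl]
      simp [rl, bl]
  | cons cur rest' ih =>
      intro last prev
      rw [mergeA_go]
      by_cases hty : (dGet last "type" == dGet cur "type") = true
      · rw [if_pos hty, ih, bl_absorb sep last cur rest' hty]
      · rw [if_neg hty, ih, bl_push sep last cur rest' hty]
        simp

-- ===== VERDICT =====
theorem merge_consecutive_same_type_spec : Claim_equal_merge_consecutive_same_type := by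
  intro sg sep _ _
  unfold Spec_merge_consecutive_same_type
  match sg with
  | [] => rfl
  | g0 :: rest =>
      rw [merge_consecutive_same_type, merge_consecutive_same_type_alt]
      rw [if_neg (by simp), bOuter_eq _ _ ((g0 :: rest).length) 0 (by omega), List.drop_zero, mergeA_go_eq]
      simp
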